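-- pv_equiv track=rewrite | github.com/arcsaef/arcsaef | lib/hindex.py | hindex_distribution
-- ===== SOURCE A (Python) =====
-- def hindex_distribution(hindexes):
--   gt80, gt70, gt50, gt40, gt20 = 0, 0, 0, 0, 0
--
--   for hindex in hindexes:
--     if hindex >= 80:
--       gt80 += 1
--     if hindex >= 70 and hindex < 80:
--       gt70 += 1
--     if hindex >= 50 and hindex < 70:
--       gt50 += 1
--     if hindex >= 40 and hindex < 50:
--       gt40 += 1
--     if hindex >= 20 and hindex < 40:
--       gt20 += 1
--   return f">80: {gt80} >70: {gt70} >50: {gt50} >40: {gt40} >20: {gt20}"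
-- ===== SOURCE B (Python) =====
-- def _bisect_left(s, x):
--     # standard bisect_left binary search on a sorted list
--     lo, hi = 0, len(s)
--     while lo < hi:
--         mid = (lo + hi) // 2
--         if s[mid] < x:
--             lo = mid + 1
--         else:
--             hi = mid
--     return lo
--
--
-- def hindex_distribution(hindexes):
--     s = sorted(hindexes)
--     n = len(s)
--     b20 = _bisect_left(s, 20)
--     b40 = _bisect_left(s, 40)
--     b50 = _bisect_left(s, 50)
--     b70 = _bisect_left(s, 70)
--     b80 = _bisect_left(s, 80)
--     return (f">80: {n - b80} >70: {b80 - b70} >50: {b70 - b50} "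
--             f">40: {b50 - b40} >20: {b40 - b20}")
-- ===== Notes on version B (the rewrite author's own statement) =====
-- stated objective: alternative
-- what changed: Replaces the five per-element range tests with sort-then-binary-search: sort once, find the cumulative boundary positions 20/40/50/70/80 with bisect_left, and obtain each bucket count as a difference of adjacent positions.
import Mathlib
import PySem

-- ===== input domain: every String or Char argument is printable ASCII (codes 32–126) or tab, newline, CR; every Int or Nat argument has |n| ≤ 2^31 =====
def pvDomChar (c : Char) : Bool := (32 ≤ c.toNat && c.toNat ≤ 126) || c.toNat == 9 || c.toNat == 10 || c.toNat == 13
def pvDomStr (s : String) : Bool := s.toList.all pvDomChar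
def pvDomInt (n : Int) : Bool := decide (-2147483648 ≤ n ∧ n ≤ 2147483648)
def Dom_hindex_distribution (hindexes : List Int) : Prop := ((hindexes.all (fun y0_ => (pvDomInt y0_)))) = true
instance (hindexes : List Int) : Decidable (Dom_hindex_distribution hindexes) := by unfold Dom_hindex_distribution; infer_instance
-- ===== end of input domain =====

-- B replaces A's five per-element range tests with sort + binary search at the
-- bucket boundaries; same values everywhere (objective: alternative algorithm).

-- ===== PORT A =====
def hindex_distribution (hindexes : List Int) : String :=
  let r := hindexes.foldl
    (fun (acc : Int × Int × Int × Int × Int) hindex =>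
      let g80 := if hindex ≥ 80 then acc.1 + 1 else acc.1
      let g70 := if hindex ≥ 70 ∧ hindex < 80 then acc.2.1 + 1 else acc.2.1
      let g50 := if hindex ≥ 50 ∧ hindex < 70 then acc.2.2.1 + 1 else acc.2.2.1
      let g40 := if hindex ≥ 40 ∧ hindex < 50 then acc.2.2.2.1 + 1 else acc.2.2.2.1
      let g20 := if hindex ≥ 20 ∧ hindex < 40 then acc.2.2.2.2 + 1 else acc.2.2.2.2
      (g80, g70, g50, g40, g20))
    (0, 0, 0, 0, 0)
  ">80: " ++ PySem.Int.toStr r.1 ++ " >70: " ++ PySem.Int.toStr r.2.1 ++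
  " >50: " ++ PySem.Int.toStr r.2.2.1 ++ " >40: " ++ PySem.Int.toStr r.2.2.2.1 ++
  " >20: " ++ PySem.Int.toStr r.2.2.2.2

-- ===== PORT B =====
-- Source B's hand-written _bisect_left is the standard bisect_left binary-search
-- loop; PySem.List.bisectLeft is exactly that loop (same lo/hi/mid recursion).
def hindex_distribution_alt (hindexes : List Int) : String :=
  let s := PySem.List.sorted hindexes (fun x => x) false
  let n : Int := s.length
  let b20 : Int := PySem.List.bisectLeft s 20
  let b40 : Int := PySem.List.bisectLeft s 40
  let b50 : Int := PySem.List.bisectLeft s 50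
  let b70 : Int := PySem.List.bisectLeft s 70
  let b80 : Int := PySem.List.bisectLeft s 80
  ">80: " ++ PySem.Int.toStr (n - b80) ++ " >70: " ++ PySem.Int.toStr (b80 - b70) ++
  " >50: " ++ PySem.Int.toStr (b70 - b50) ++ " >40: " ++ PySem.Int.toStr (b50 - b40) ++
  " >20: " ++ PySem.Int.toStr (b40 - b20)

-- ===== PRECONDITION & SPEC =====
def Spec_hindex_distribution (hindexes : List Int) (out : String) : Prop := out = hindex_distribution_alt hindexes
instance (hindexes : List Int) (out : String) : Decidable (Spec_hindex_distribution hindexes out) := by unfold Spec_hindex_distribution; infer_instance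

-- ===== CLAIM (what is proved, stated in full; the proofs are below) =====
def Claim_equal_hindex_distribution : Prop := ∀ (hindexes : List Int), Dom_hindex_distribution hindexes → Spec_hindex_distribution hindexes (hindex_distribution hindexes)

-- ===== LEMMAS AND PROOFS =====

-- bisect_left on a sorted list lands at the number of elements below x
theorem bisectLeft_eq_countP (s : List Int) (x : Int)
    (hs : s.Pairwise (· ≤ ·)) :
    PySem.List.bisectLeft s x = s.countP (fun h => decide (h < x)) := by
  obtain ⟨hle, hlt, hge⟩ := PySem.List.bisectLeft_spec s x hs
  set b := PySem.List.bisectLeft s x with hb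
  have hsplit : s = s.take b ++ s.drop b := (List.take_append_drop b s).symm
  have h1 : (s.take b).countP (fun h => decide (h < x)) = (s.take b).length := by
    rw [List.countP_eq_length]
    intro a ha
    obtain ⟨i, hi, hgi⟩ := List.mem_iff_getElem.mp ha
    have hib : i < b := lt_of_lt_of_le hi (by simp)
    have hilen : i < s.length := lt_of_lt_of_le hib hle
    have := hlt i hilen hib
    simp only [List.getElem_take] at hgi
    subst hgi
    simpa using this
  have h2 : (s.drop b).countP (fun h => decide (h < x)) = 0 := by
    rw [List.countP_eq_zero]
    intro a ha
    obtain ⟨i, hi, hgi⟩ := List.mem_iff_getElem.mp ha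
    have hilen : b + i < s.length := by simpa [Nat.lt_sub_iff_add_lt'] using hi
    have := hge (b + i) hilen (Nat.le_add_right b i)
    rw [List.getElem_drop] at hgi
    subst hgi
    simpa using this
  conv_rhs => rw [hsplit]
  rw [List.countP_append, h1, h2, List.length_take]
  omega

-- split a below-b count at a lower boundary a
theorem countP_lt_split (l : List Int) (a b : Int) (hab : a ≤ b) :
    l.countP (fun h => decide (h < b)) =
      l.countP (fun h => decide (h < a)) +
      l.countP (fun h => decide (a ≤ h ∧ h < b)) := by
  induction l with
  | nil => simp
  | cons y t ih =>
    simp only [List.countP_cons, ih, decide_eq_true_eq]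
    split_ifs <;> omega

-- elements ≥ b are the rest of the list
theorem countP_lt_add_ge (l : List Int) (b : Int) :
    l.countP (fun h => decide (h < b)) +
      l.countP (fun h => decide (b ≤ h)) = l.length := by
  induction l with
  | nil => simp
  | cons y t ih =>
    simp only [List.countP_cons, List.length_cons, decide_eq_true_eq]
    split_ifs <;> omega

-- A's fold accumulates the five range counts
theorem foldA_eq (l : List Int) (g80 g70 g50 g40 g20 : Int) :
    l.foldl
      (fun (acc : Int × Int × Int × Int × Int) hindex =>
        let a80 := if hindex ≥ 80 then acc.1 + 1 else acc.1
        let a70 := if hindex ≥ 70 ∧ hindex < 80 then acc.2.1 + 1 else acc.2.1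
        let a50 := if hindex ≥ 50 ∧ hindex < 70 then acc.2.2.1 + 1 else acc.2.2.1
        let a40 := if hindex ≥ 40 ∧ hindex < 50 then acc.2.2.2.1 + 1 else acc.2.2.2.1
        let a20 := if hindex ≥ 20 ∧ hindex < 40 then acc.2.2.2.2 + 1 else acc.2.2.2.2
        (a80, a70, a50, a40, a20))
      (g80, g70, g50, g40, g20) =
    (g80 + l.countP (fun h => decide ((80:Int) ≤ h)),
     g70 + l.countP (fun h => decide ((70:Int) ≤ h ∧ h < 80)),
     g50 + l.countP (fun h => decide ((50:Int) ≤ h ∧ h < 70)),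
     g40 + l.countP (fun h => decide ((40:Int) ≤ h ∧ h < 50)),
     g20 + l.countP (fun h => decide ((20:Int) ≤ h ∧ h < 40))) := by
  induction l generalizing g80 g70 g50 g40 g20 with
  | nil => simp
  | cons y t ih =>
    simp only [List.foldl_cons, List.countP_cons, ih]
    simp only [decide_eq_true_eq, ge_iff_le]
    refine Prod.ext ?_ (Prod.ext ?_ (Prod.ext ?_ (Prod.ext ?_ ?_))) <;>
      dsimp only <;> split_ifs <;> push_cast <;> omega

-- ===== VERDICT (by name: the statement is the Claim_ definition above) =====
theorem hindex_distribution_spec : Claim_equal_hindex_distribution := by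
  intro l _
  show _ = _
  unfold hindex_distribution hindex_distribution_alt
  simp only [foldA_eq, zero_add]
  have hperm : (PySem.List.sorted l (fun x => x) false).Perm l :=
    PySem.List.sorted_perm l (fun x => x) false
  have hpw : (PySem.List.sorted l (fun x => x) false).Pairwise (· ≤ ·) := by
    have := PySem.List.sorted_pairwise l (fun x => x)
    simpa using this
  set s := PySem.List.sorted l (fun x => x) false with hsdef
  have b20 := bisectLeft_eq_countP s 20 hpw
  have b40 := bisectLeft_eq_countP s 40 hpw
  have b50 := bisectLeft_eq_countP s 50 hpw
  have b70 := bisectLeft_eq_countP s 70 hpw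
  have b80 := bisectLeft_eq_countP s 80 hpw
  have h1 : ((s.length : Int) - (PySem.List.bisectLeft s 80 : Int)) =
      ((l.countP (fun h => decide ((80:Int) ≤ h)) : Int)) := by
    rw [b80, hperm.countP_eq, hperm.length_eq]
    have := countP_lt_add_ge l 80; omega
  have h2 : ((PySem.List.bisectLeft s 80 : Int) - (PySem.List.bisectLeft s 70 : Int)) =
      ((l.countP (fun h => decide ((70:Int) ≤ h ∧ h < 80)) : Int)) := by
    rw [b80, b70, hperm.countP_eq, hperm.countP_eq]
    have := countP_lt_split l 70 80 (by norm_num); omega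
  have h3 : ((PySem.List.bisectLeft s 70 : Int) - (PySem.List.bisectLeft s 50 : Int)) =
      ((l.countP (fun h => decide ((50:Int) ≤ h ∧ h < 70)) : Int)) := by
    rw [b70, b50, hperm.countP_eq, hperm.countP_eq]
    have := countP_lt_split l 50 70 (by norm_num); omega
  have h4 : ((PySem.List.bisectLeft s 50 : Int) - (PySem.List.bisectLeft s 40 : Int)) =
      ((l.countP (fun h => decide ((40:Int) ≤ h ∧ h < 50)) : Int)) := by
    rw [b50, b40, hperm.countP_eq, hperm.countP_eq]
    have := countP_lt_split l 40 50 (by norm_num); omega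
  have h5 : ((PySem.List.bisectLeft s 40 : Int) - (PySem.List.bisectLeft s 20 : Int)) =
      ((l.countP (fun h => decide ((20:Int) ≤ h ∧ h < 40)) : Int)) := by
    rw [b40, b20, hperm.countP_eq, hperm.countP_eq]
    have := countP_lt_split l 20 40 (by norm_num); omega
  rw [h1, h2, h3, h4, h5]
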